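-- pv_equiv track=rewrite | github.com/MartinXu6/BIO-prep | 2016/Q1.py | frac
-- ===== SOURCE A (Python) =====
-- def frac(word):
--     if word == "":
--         return [1, 0, 0, 1]
--     elif "R" not in word:
--         left = frac(word[:-1])
--         return [left[0], 0, left[2] + 1, 1]
--     elif "L" not in word:
--         right = frac(word[:-1])
--         return [1, right[1] + 1, 0, right[3]]
--     else:
--         left = frac(word[:len(word) - word[::-1].index("L") - 1])
--         right = frac(word[:len(word) - word[::-1].index("R") - 1])
--         return [left[0] + right[0], left[1] + right[1], left[2] + right[2], left[3] + right[3]]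
-- ===== SOURCE B (Python) =====
-- def frac(word):
--     # Bottom-up DP over prefix lengths: f[k] = frac(word[:k]), computed in one pass
--     # while tracking the last positions of 'L' and 'R' seen so far.
--     n = len(word)
--     f = [[1, 0, 0, 1]]
--     lastL = -1
--     lastR = -1
--     for k in range(1, n + 1):
--         c = word[k - 1]
--         if c == 'L':
--             lastL = k - 1
--         elif c == 'R':
--             lastR = k - 1
--         prev = f[k - 1]
--         if lastR < 0:
--             f.append([prev[0], 0, prev[2] + 1, 1])
--         elif lastL < 0:
--             f.append([1, prev[1] + 1, 0, prev[3]])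
--         else:
--             a = f[lastL]
--             b = f[lastR]
--             f.append([a[0] + b[0], a[1] + b[1], a[2] + b[2], a[3] + b[3]])
--     return f[n]
-- ===== Notes on version B (the rewrite author's own statement) =====
-- stated objective: faster
-- what changed: Replaced A's naive recursion over prefixes (each call re-recursing into shorter prefixes, with exponentially many overlapping calls on words mixing L and R) by a single bottom-up pass that tabulates frac(word[:k]) for k = 0..n while tracking the last positions of 'L' and 'R'.
import Mathlib
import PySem

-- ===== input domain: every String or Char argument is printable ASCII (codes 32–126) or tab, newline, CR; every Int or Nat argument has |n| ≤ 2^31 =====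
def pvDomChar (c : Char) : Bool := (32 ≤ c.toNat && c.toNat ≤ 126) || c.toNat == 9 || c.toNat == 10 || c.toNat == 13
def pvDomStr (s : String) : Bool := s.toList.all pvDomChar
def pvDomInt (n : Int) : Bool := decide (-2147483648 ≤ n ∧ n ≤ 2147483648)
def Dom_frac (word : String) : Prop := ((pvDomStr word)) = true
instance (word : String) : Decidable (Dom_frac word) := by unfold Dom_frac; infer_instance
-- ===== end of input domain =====

-- B replaces A's naive recursion over prefixes (exponentially many overlapping calls)
-- by a single bottom-up pass computing frac(word[:k]) for k = 0..n; objective: faster.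

-- ===== PORT A =====
-- termination helper for the mixed branch: the prefix ending before the last
-- occurrence of c (computed as Python does, via word[::-1].index(c)) is shorter than w
lemma pv_slice_len_lt (w : List Char) (c : Char) (hc : c ∈ w) :
    (PySem.List.slice w none
      (some ((w.length : Int) - (((PySem.List.index? w.reverse c).getD 0 : Nat) : Int) - 1))).length
      < w.length := by
  obtain ⟨i, hi⟩ := Option.isSome_iff_exists.mp
    ((PySem.List.index?_isSome_iff _ _).mpr (List.mem_reverse.mpr hc))
  obtain ⟨hik, -⟩ := PySem.List.getElem_of_index?_eq_some hi
  rw [List.length_reverse] at hik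
  have hlen : 0 < w.length := List.length_pos_of_mem hc
  rw [hi]
  simp only [Option.getD_some]
  rw [PySem.List.slice_to w (show (0:Int) ≤ (w.length : Int) - (i : Int) - 1 by omega)]
  simp [List.length_take]
  omega

-- literal port of A ('word == ""' / '"R" not in word' / 'word[:-1]' /
-- 'word[:len(word) - word[::-1].index(c) - 1]'; str s[::-1].index(c) for a single
-- character c is exactly index? on the reversed character list)
def fracList (w : List Char) : List Int :=
  if _h0 : w = [] then [1, 0, 0, 1]
  else if hR : 'R' ∉ w then
    let left := fracList (PySem.List.slice w none (some (-1)))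
    [left.getD 0 0, 0, left.getD 2 0 + 1, 1]
  else if hL : 'L' ∉ w then
    let right := fracList (PySem.List.slice w none (some (-1)))
    [1, right.getD 1 0 + 1, 0, right.getD 3 0]
  else
    let left := fracList (PySem.List.slice w none
      (some ((w.length : Int) - (((PySem.List.index? w.reverse 'L').getD 0 : Nat) : Int) - 1)))
    let right := fracList (PySem.List.slice w none
      (some ((w.length : Int) - (((PySem.List.index? w.reverse 'R').getD 0 : Nat) : Int) - 1)))
    [left.getD 0 0 + right.getD 0 0, left.getD 1 0 + right.getD 1 0,
     left.getD 2 0 + right.getD 2 0, left.getD 3 0 + right.getD 3 0]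
termination_by w.length
decreasing_by
  · rw [PySem.List.slice_to_neg_one]
    have := List.length_pos_of_ne_nil _h0
    simp [List.length_dropLast]; omega
  · rw [PySem.List.slice_to_neg_one]
    have := List.length_pos_of_ne_nil _h0
    simp [List.length_dropLast]; omega
  · simp only [List.unattach_reverse, List.unattach_attach]
    exact pv_slice_len_lt w 'L' (not_not.mp hL)
  · simp only [List.unattach_reverse, List.unattach_attach]
    exact pv_slice_len_lt w 'R' (not_not.mp hR)

def frac (word : String) : List Int := fracList word.toList

-- ===== PORT B =====
-- loop body of Source B (one iteration of 'for k in range(1, n+1)')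
def fracAltStep (w : List Char) (st : List (List Int) × Int × Int) (k : Int) :
    List (List Int) × Int × Int :=
  let f := st.1
  let c := PySem.List.pyGetD w (k - 1) ' '
  let lastL := if c = 'L' then k - 1 else st.2.1
  let lastR := if c = 'R' then k - 1 else st.2.2
  let prev := PySem.List.pyGetD f (k - 1) []
  let nxt :=
    if lastR < 0 then [prev.getD 0 0, 0, prev.getD 2 0 + 1, 1]
    else if lastL < 0 then [1, prev.getD 1 0 + 1, 0, prev.getD 3 0]
    else
      let a := PySem.List.pyGetD f lastL []
      let b := PySem.List.pyGetD f lastR []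
      [a.getD 0 0 + b.getD 0 0, a.getD 1 0 + b.getD 1 0,
       a.getD 2 0 + b.getD 2 0, a.getD 3 0 + b.getD 3 0]
  (f ++ [nxt], lastL, lastR)

def frac_alt (word : String) : List Int :=
  let w := word.toList
  let n : Int := w.length
  let st := (PySem.List.pyRange 1 (n + 1) 1).foldl (fracAltStep w) ([[1, 0, 0, 1]], -1, -1)
  PySem.List.pyGetD st.1 n []

-- ===== PRECONDITION & SPEC =====
def Spec_frac (word : String) (out : List Int) : Prop := out = frac_alt word
instance (word : String) (out : List Int) : Decidable (Spec_frac word out) := by unfold Spec_frac; infer_instance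

-- ===== CLAIM (what is proved, stated in full; the proofs are below) =====
def Claim_equal_frac : Prop := ∀ (word : String), Dom_frac word → Spec_frac word (frac word)

-- ===== LEMMAS AND PROOFS =====

-- the (0-based) index of the last occurrence of c in w, as A computes it; -1 if absent
def lastIdxI (c : Char) (w : List Char) : Int :=
  if c ∈ w then (w.length : Int) - ((PySem.List.index? w.reverse c).getD 0 : Nat) - 1 else -1

lemma lastIdxI_spec {c : Char} {w : List Char} (hc : c ∈ w) :
    ∃ i : Nat, PySem.List.index? w.reverse c = some i ∧ i < w.length ∧
      lastIdxI c w = (w.length : Int) - i - 1 := by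
  obtain ⟨i, hi⟩ := Option.isSome_iff_exists.mp
    ((PySem.List.index?_isSome_iff _ _).mpr (List.mem_reverse.mpr hc))
  obtain ⟨hik, -⟩ := PySem.List.getElem_of_index?_eq_some hi
  rw [List.length_reverse] at hik
  exact ⟨i, hi, hik, by simp only [lastIdxI, if_pos hc, hi, Option.getD_some]⟩

lemma lastIdxI_bounds {c : Char} {w : List Char} (hc : c ∈ w) :
    0 ≤ lastIdxI c w ∧ lastIdxI c w < w.length := by
  obtain ⟨i, -, hik, he⟩ := lastIdxI_spec hc
  constructor <;> omega

lemma lastIdxI_neg_iff (c : Char) (w : List Char) : lastIdxI c w < 0 ↔ c ∉ w := by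
  by_cases hc : c ∈ w
  · have := lastIdxI_bounds hc
    simp [hc]; omega
  · simp [lastIdxI, hc]

lemma lastIdxI_snoc (c d : Char) (u : List Char) :
    lastIdxI c (u ++ [d]) = if d = c then (u.length : Int) else lastIdxI c u := by
  by_cases hdc : d = c
  · subst hdc
    have hm : d ∈ u ++ [d] := by simp
    have hrev : (u ++ [d]).reverse = d :: u.reverse := by simp
    rw [lastIdxI, if_pos hm, hrev, PySem.List.index?_cons_self]
    simp
  · have hrev : (u ++ [d]).reverse = d :: u.reverse := by simp
    have hidx := PySem.List.index?_cons_of_ne (x := d) (v := c) u.reverse hdc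
    by_cases hc : c ∈ u
    · obtain ⟨i, hi, hik, he⟩ := lastIdxI_spec hc
      have hm : c ∈ u ++ [d] := by simp [hc]
      rw [lastIdxI, if_pos hm, hrev, hidx, hi, if_neg hdc, he]
      simp only [Option.map_some, Option.getD_some, List.length_append, List.length_cons,
        List.length_nil]
      push_cast
      omega
    · have hm : c ∉ u ++ [d] := by simp [hc, Ne.symm hdc]
      simp [lastIdxI, hm, hc, hdc]

-- A's mixed-branch slice is the prefix up to the last occurrence of c
lemma slice_eq_take_lastIdxI {c : Char} {w : List Char} (hc : c ∈ w) :
    PySem.List.slice w none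
        (some ((w.length : Int) - (((PySem.List.index? w.reverse c).getD 0 : Nat) : Int) - 1))
      = w.take (lastIdxI c w).toNat := by
  obtain ⟨i, hi, hik, he⟩ := lastIdxI_spec hc
  rw [hi]
  simp only [Option.getD_some]
  rw [PySem.List.slice_to w (show (0:Int) ≤ (w.length : Int) - (i : Int) - 1 by omega)]
  congr 1
  omega

lemma fracList_nil : fracList [] = [1, 0, 0, 1] := by rw [fracList]; simp

-- one loop iteration of B extends the table by frac of the next prefix and
-- updates the last positions of 'L' and 'R'
lemma fracAltStep_spec (w : List Char) (k : Nat) (hk : k < w.length) :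
    fracAltStep w ((List.range (k + 1)).map (fun i => fracList (w.take i)),
        lastIdxI 'L' (w.take k), lastIdxI 'R' (w.take k)) ((k : Int) + 1)
      = ((List.range (k + 2)).map (fun i => fracList (w.take i)),
        lastIdxI 'L' (w.take (k + 1)), lastIdxI 'R' (w.take (k + 1))) := by
  have hsucc : w.take (k + 1) = w.take k ++ [w[k]] := by
    rw [List.take_add_one, List.getElem?_eq_getElem hk]; rfl
  have hlen : (w.take k).length = k := by simp [List.length_take]; omega
  have hlen1 : (w.take (k + 1)).length = k + 1 := by simp [List.length_take]; omega
  have hL' : lastIdxI 'L' (w.take (k + 1))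
      = if w[k] = 'L' then ((k : Nat) : Int) else lastIdxI 'L' (w.take k) := by
    rw [hsucc, lastIdxI_snoc, hlen]
  have hR' : lastIdxI 'R' (w.take (k + 1))
      = if w[k] = 'R' then ((k : Nat) : Int) else lastIdxI 'R' (w.take k) := by
    rw [hsucc, lastIdxI_snoc, hlen]
  have hF : (List.range (k + 2)).map (fun i => fracList (w.take i))
      = (List.range (k + 1)).map (fun i => fracList (w.take i)) ++ [fracList (w.take (k + 1))] := by
    rw [show k + 2 = (k + 1) + 1 from rfl, List.range_succ, List.map_append]; rfl
  simp only [fracAltStep, add_sub_cancel_right]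
  rw [PySem.List.pyGetD_natCast w, List.getD_eq_getElem w ' ' hk,
    PySem.List.pyGetD_natCast, PySem.List.getD_map_range _ _ _ _ (Nat.lt_succ_self k),
    ← hL', ← hR', hF]
  refine Prod.ext ?_ (Prod.ext (by rfl) (by rfl))
  simp only [List.append_cancel_left_eq, List.cons.injEq, and_true]
  -- remaining: the new table entry equals frac of the next prefix
  by_cases hRm : 'R' ∈ w.take (k + 1)
  · by_cases hLm : 'L' ∈ w.take (k + 1)
    · -- mixed branch: both letters occur in the prefix
      have h0 : w.take (k + 1) ≠ [] := by intro h; rw [h] at hlen1; simp at hlen1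
      have hLb := lastIdxI_bounds hLm
      have hRb := lastIdxI_bounds hRm
      rw [hlen1] at hLb hRb
      rw [if_neg (by omega), if_neg (by omega)]
      conv_rhs => rw [fracList]
      rw [dif_neg h0, dif_neg (not_not.mpr hRm), dif_neg (not_not.mpr hLm)]
      simp only
      rw [slice_eq_take_lastIdxI hLm, slice_eq_take_lastIdxI hRm]
      rw [List.take_take, List.take_take,
        min_eq_left (by omega), min_eq_left (by omega)]
      rw [show lastIdxI 'L' (w.take (k + 1)) = (((lastIdxI 'L' (w.take (k + 1))).toNat : Nat) : Int)
            from (Int.toNat_of_nonneg hLb.1).symm,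
          show lastIdxI 'R' (w.take (k + 1)) = (((lastIdxI 'R' (w.take (k + 1))).toNat : Nat) : Int)
            from (Int.toNat_of_nonneg hRb.1).symm]
      rw [PySem.List.pyGetD_natCast, PySem.List.pyGetD_natCast,
        PySem.List.getD_map_range _ _ _ _ (by omega), PySem.List.getD_map_range _ _ _ _ (by omega)]
      simp only [Int.toNat_natCast]
    · -- 'R' occurs, 'L' does not
      have h0 : w.take (k + 1) ≠ [] := by intro h; rw [h] at hlen1; simp at hlen1
      have hRb := lastIdxI_bounds hRm
      have hLneg : lastIdxI 'L' (w.take (k + 1)) < 0 := (lastIdxI_neg_iff _ _).mpr hLm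
      rw [if_neg (by omega), if_pos hLneg]
      conv_rhs => rw [fracList]
      rw [dif_neg h0, dif_neg (not_not.mpr hRm), dif_pos hLm]
      simp only
      rw [PySem.List.slice_to_neg_one, hsucc, List.dropLast_concat]
  · -- 'R' does not occur in the prefix
    have h0 : w.take (k + 1) ≠ [] := by intro h; rw [h] at hlen1; simp at hlen1
    have hRneg : lastIdxI 'R' (w.take (k + 1)) < 0 := (lastIdxI_neg_iff _ _).mpr hRm
    rw [if_pos hRneg]
    conv_rhs => rw [fracList]
    rw [dif_neg h0, dif_pos hRm]
    simp only
    rw [PySem.List.slice_to_neg_one, hsucc, List.dropLast_concat]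

-- the loop invariant of B: after iterations 1..k the table holds frac of every prefix
-- of length ≤ k and lastL/lastR are the last positions of 'L'/'R' in word[:k]
lemma frac_loop_inv (w : List Char) (k : Nat) (hk : k ≤ w.length) :
    (PySem.List.pyRange 1 ((k : Int) + 1) 1).foldl (fracAltStep w) ([[1, 0, 0, 1]], -1, -1)
      = ((List.range (k + 1)).map (fun i => fracList (w.take i)),
         lastIdxI 'L' (w.take k), lastIdxI 'R' (w.take k)) := by
  induction k with
  | zero =>
    rw [PySem.List.pyRange_one_eq_nil (by simp)]
    simp [fracList_nil, lastIdxI]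
  | succ k ih =>
    have hk' : k < w.length := by omega
    have hcast : (((k + 1 : Nat)) : Int) + 1 = ((k : Int) + 1) + 1 := by push_cast; ring
    rw [hcast, PySem.List.pyRange_one_succ_right (by omega), List.foldl_append,
      ih (by omega), List.foldl_cons, List.foldl_nil, fracAltStep_spec w k hk']

-- ===== VERDICT (by name: the statement is the Claim_ definition above) =====
theorem frac_spec : Claim_equal_frac := by
  intro word _
  unfold Spec_frac frac frac_alt
  have h := frac_loop_inv word.toList word.toList.length le_rfl
  simp only [h]
  rw [PySem.List.pyGetD_natCast]
  rw [PySem.List.getD_map_range _ _ _ _ (Nat.lt_succ_self _)]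
  rw [List.take_length]
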